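-- pv_equiv track=rewrite | github.com/useredsa/automatons-in-python | task1/JflapAutomaton_Minimizer.py | equivStates
-- ===== SOURCE A (Python) =====
-- def equivStates(T):
--     #Equivalence tree
--     equiv = [-1] * len(T)
--     #Iterate over the table to find no marked elements
--     for j in range(1, len(T), 1):
--         i = 0
--         while i < j:
--             if not T[j][i][0]:
--                 equiv[j] = i
--             i += 1
--     count = 0
--     #Join equivalent states
--     for n in range(len(equiv)):
--         aux  = n
--         if equiv[n]==-1: count += 1
--         while equiv[aux] != -1:
--             aux = equiv[aux]
--         if n!=aux:
--             equiv[n] = aux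
--
--     return (equiv,count)
-- ===== SOURCE B (Python) =====
-- def _lastUnmarked(T, j):
--     # largest i < j whose table cell is unmarked, or -1
--     p = -1
--     for i in range(j):
--         if not T[j][i][0]:
--             p = i
--     return p
--
-- def equivStates(T):
--     n = len(T)
--     parent = [_lastUnmarked(T, j) for j in range(n)]
--     # single forward DP pass: parent[j] < j, so root[parent[j]] is already final
--     root = [0] * n
--     equiv = [-1] * n
--     count = 0
--     for j in range(n):
--         p = parent[j]
--         if p == -1:
--             root[j] = j
--             count += 1
--         else:
--             r = root[p]
--             root[j] = r
--             equiv[j] = r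
--     return (equiv, count)
-- ===== Notes on version B (the rewrite author's own statement) =====
-- stated objective: alternative
-- what changed: Phase 2's in-place per-node chain-walking (while equiv[aux] != -1) is replaced by a single forward dynamic-programming pass that fills a separate root array (root[parent[j]] is already final because parent[j] < j) and never walks chains or mutates the parent table.
import Mathlib
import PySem

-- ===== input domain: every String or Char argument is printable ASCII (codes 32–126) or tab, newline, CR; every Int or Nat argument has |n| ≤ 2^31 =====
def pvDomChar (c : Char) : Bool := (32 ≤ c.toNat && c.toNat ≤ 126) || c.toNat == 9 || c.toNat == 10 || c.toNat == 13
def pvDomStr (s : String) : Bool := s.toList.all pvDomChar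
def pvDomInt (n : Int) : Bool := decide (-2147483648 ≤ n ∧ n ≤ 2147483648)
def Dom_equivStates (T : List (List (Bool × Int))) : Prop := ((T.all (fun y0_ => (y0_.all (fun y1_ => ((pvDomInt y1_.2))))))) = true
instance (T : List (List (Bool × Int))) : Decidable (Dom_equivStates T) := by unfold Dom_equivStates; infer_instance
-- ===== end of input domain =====

-- B replaces A's in-place path-chasing second phase by a forward DP over a separate
-- root array (parent[j] < j, so root[parent[j]] is final when j is reached); alternative
-- decomposition, same asymptotic cost.


-- ===== PORT A =====
-- 'not T[j][i][0]' (shared cell accessor); none = IndexError, excluded by Pre_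
def cellUnmarked (T : List (List (Bool × Int))) (j i : Nat) : Bool :=
  match PySem.List.pyGet? (T.getD j []) (i : Int) with
  | some c => !c.1
  | none => false

-- inner loop of phase 1: 'i = 0; while i < j: if not T[j][i][0]: equiv[j] = i; i += 1'
def innerA (T : List (List (Bool × Int))) (j : Nat) (e : List Int) : List Int :=
  (List.range j).foldl (fun e i => if cellUnmarked T j i then e.set j (i : Int) else e) e

-- 'while equiv[aux] != -1: aux = equiv[aux]'; fuel len+1 (the chain indices strictly decrease)
def chaseA (e : List Int) : Nat → Nat → Nat
  | aux, 0 => aux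
  | aux, f+1 => if e.getD aux (-1) = -1 then aux else chaseA e (e.getD aux (-1)).toNat f

-- one iteration of phase 2: 'aux = n; if equiv[n]==-1: count += 1; while …; if n != aux: equiv[n] = aux'
def bodyA (st : List Int × Int) (n : Nat) : List Int × Int :=
  let c := if st.1.getD n (-1) = -1 then st.2 + 1 else st.2
  let aux := chaseA st.1 n (st.1.length + 1)
  (if n ≠ aux then st.1.set n (aux : Int) else st.1, c)

def equivStates (T : List (List (Bool × Int))) : List Int × Int :=
  -- equiv = [-1]*len(T); for j in range(1, len(T), 1): <innerA>
  let e1 := ((List.range T.length).drop 1).foldl (fun e j => innerA T j e)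
      (List.replicate T.length (-1))
  -- count = 0; for n in range(len(equiv)): <bodyA>
  (List.range e1.length).foldl bodyA (e1, 0)

-- ===== PORT B =====
-- 'p = -1; for i in range(j): if not T[j][i][0]: p = i; return p'
def lastUnmarked (T : List (List (Bool × Int))) (j : Nat) : Int :=
  (List.range j).foldl (fun p i => if cellUnmarked T j i then (i : Int) else p) (-1)

-- one DP step over the state (root, equiv, count)
def bodyB (parent : List Int) (st : List Int × List Int × Int) (j : Nat) :
    List Int × List Int × Int :=
  let p := parent.getD j (-1)
  if p = -1 then (st.1.set j (j : Int), st.2.1, st.2.2 + 1)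
  else
    let r := st.1.getD p.toNat 0
    (st.1.set j r, st.2.1.set j r, st.2.2)

def equivStates_alt (T : List (List (Bool × Int))) : List Int × Int :=
  let n := T.length
  let parent := (List.range n).map (lastUnmarked T)
  let fin := (List.range n).foldl (bodyB parent)
      (List.replicate n 0, List.replicate n (-1), 0)
  (fin.2.1, fin.2.2)

-- ===== PRECONDITION & SPEC =====
-- Python A reads T[j][i] for every i < j, so it raises IndexError iff some row j is shorter than j.
def Pre_equivStates (T : List (List (Bool × Int))) : Prop :=
  ∀ j, j < T.length → j ≤ (T.getD j []).length
instance (T : List (List (Bool × Int))) : Decidable (Pre_equivStates T) := by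
  unfold Pre_equivStates; infer_instance

def pvWitness_equivStates : (List (List (Bool × Int))) := [[], [((false : Bool), (0 : Int))]]

def Spec_equivStates (T : List (List (Bool × Int))) (out : List Int × Int) : Prop := out = equivStates_alt T
instance (T : List (List (Bool × Int))) (out : List Int × Int) : Decidable (Spec_equivStates T out) := by unfold Spec_equivStates; infer_instance

-- ===== CLAIM (what is proved, stated in full; the proofs are below) =====
def Claim_equal_equivStates : Prop := ∀ (T : List (List (Bool × Int))), Dom_equivStates T → Pre_equivStates T → Spec_equivStates T (equivStates T)

-- ===== LEMMAS AND PROOFS =====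

theorem chaseA_succ (e : List Int) (aux f : Nat) :
    chaseA e aux (f+1)
      = if e.getD aux (-1) = -1 then aux else chaseA e (e.getD aux (-1)).toNat f := rfl

-- partial fold of lastUnmarked: the last unmarked i < m (row j), else -1
def lastUpto (T : List (List (Bool × Int))) (j m : Nat) : Int :=
  (List.range m).foldl (fun p i => if cellUnmarked T j i then (i : Int) else p) (-1)

theorem lastUnmarked_def (T : List (List (Bool × Int))) (j : Nat) :
    lastUnmarked T j = lastUpto T j j := rfl

theorem lastUnmarked_zero (T : List (List (Bool × Int))) : lastUnmarked T 0 = -1 := rfl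

theorem lastUpto_succ (T : List (List (Bool × Int))) (j m : Nat) :
    lastUpto T j (m+1) = if cellUnmarked T j m then (m : Int) else lastUpto T j m := by
  by_cases h : cellUnmarked T j m <;> simp [lastUpto, List.range_succ, h]

theorem lastUpto_cases (T : List (List (Bool × Int))) (j m : Nat) :
    lastUpto T j m = -1 ∨ ∃ i : Nat, i < m ∧ lastUpto T j m = (i : Int) := by
  induction m with
  | zero => left; simp [lastUpto]
  | succ m ih =>
    rw [lastUpto_succ]
    by_cases h : cellUnmarked T j m
    · right; exact ⟨m, by omega, by simp [h]⟩
    · simp only [h, Bool.false_eq_true, if_false]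
      rcases ih with h1 | ⟨i, hi, h1⟩
      · left; exact h1
      · right; exact ⟨i, by omega, h1⟩

theorem lastUnmarked_lt (T : List (List (Bool × Int))) (j : Nat)
    (h : lastUnmarked T j ≠ -1) :
    (lastUnmarked T j).toNat < j ∧ ((lastUnmarked T j).toNat : Int) = lastUnmarked T j := by
  rcases lastUpto_cases T j j with h1 | ⟨i, hi, h1⟩
  · exact absurd ((lastUnmarked_def T j).trans h1) h
  · rw [lastUnmarked_def, h1]; simp [hi]

def rootF (T : List (List (Bool × Int))) (j : Nat) : Nat :=
  if h : lastUnmarked T j = -1 then j else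
    have : (lastUnmarked T j).toNat < j := (lastUnmarked_lt T j h).1
    rootF T (lastUnmarked T j).toNat
termination_by j

theorem rootF_eq_of_root (T : List (List (Bool × Int))) (j : Nat)
    (h : lastUnmarked T j = -1) : rootF T j = j := by rw [rootF]; simp [h]

theorem rootF_eq_step (T : List (List (Bool × Int))) (j : Nat)
    (h : ¬ lastUnmarked T j = -1) : rootF T j = rootF T (lastUnmarked T j).toNat := by
  rw [rootF]; simp [h]

theorem rootF_le (T : List (List (Bool × Int))) (j : Nat) : rootF T j ≤ j := by
  induction j using Nat.strong_induction_on with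
  | _ j ih =>
    by_cases h : lastUnmarked T j = -1
    · rw [rootF_eq_of_root T j h]
    · rw [rootF_eq_step T j h]
      have hlt := (lastUnmarked_lt T j h).1
      exact le_trans (ih _ hlt) (le_of_lt hlt)

theorem rootF_root (T : List (List (Bool × Int))) (j : Nat) :
    lastUnmarked T (rootF T j) = -1 := by
  induction j using Nat.strong_induction_on with
  | _ j ih =>
    by_cases h : lastUnmarked T j = -1
    · rw [rootF_eq_of_root T j h]; exact h
    · rw [rootF_eq_step T j h]; exact ih _ (lastUnmarked_lt T j h).1

theorem rootF_eq_self_iff (T : List (List (Bool × Int))) (j : Nat) :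
    rootF T j = j ↔ lastUnmarked T j = -1 := by
  constructor
  · intro h
    by_contra hne
    have hlt := (lastUnmarked_lt T j hne).1
    have h2 : rootF T (lastUnmarked T j).toNat ≤ (lastUnmarked T j).toNat := rootF_le T _
    rw [rootF_eq_step T j hne] at h
    omega
  · exact rootF_eq_of_root T j

-- pointwise rewriting of set on a mapped range
theorem set_map_range {n : Nat} (f : Nat → Int) (m : Nat) (v : Int) :
    ((List.range n).map f).set m v
      = (List.range n).map (fun k => if k = m then v else f k) := by
  apply List.ext_getElem
  · simp
  · intro k h1 h2
    simp only [List.getElem_set, List.getElem_map, List.getElem_range]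
    rcases eq_or_ne m k with h | h
    · simp [h]
    · simp [h, Ne.symm h]

theorem map_range_congr {n : Nat} {f g : Nat → Int} (h : ∀ k, k < n → f k = g k) :
    (List.range n).map f = (List.range n).map g := by
  apply List.map_congr_left
  intro k hk
  exact h k (List.mem_range.mp hk)

-- phase 1 of A: the inner loop writes the last unmarked index (if any) into slot j
theorem innerA_upto (T : List (List (Bool × Int))) (j m : Nat) (e : List Int) :
    (List.range m).foldl (fun e i => if cellUnmarked T j i then e.set j (i : Int) else e) e
      = if lastUpto T j m = -1 then e else e.set j (lastUpto T j m) := by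
  induction m generalizing e with
  | zero => simp [lastUpto]
  | succ m ih =>
    rw [List.range_succ, List.foldl_append, ih, lastUpto_succ]
    by_cases hc : cellUnmarked T j m
    · simp only [hc, if_true, List.foldl_cons, List.foldl_nil]
      have hm : ¬ ((m : Int) = -1) := by omega
      by_cases h : lastUpto T j m = -1
      · simp [h, hm]
      · simp [h, hm, List.set_set]
    · simp [hc]

theorem innerA_eq (T : List (List (Bool × Int))) (j : Nat) (e : List Int) :
    innerA T j e
      = if lastUnmarked T j = -1 then e else e.set j (lastUnmarked T j) := by
  rw [lastUnmarked_def]; exact innerA_upto T j j e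

theorem phase1_upto (T : List (List (Bool × Int))) (m : Nat) (hm : m ≤ T.length) :
    ((List.range m).drop 1).foldl (fun e j => innerA T j e) (List.replicate T.length (-1))
      = (List.range T.length).map (fun k => if k < m then lastUnmarked T k else -1) := by
  induction m with
  | zero =>
    apply List.ext_getElem
    · simp
    · intro k h1 h2; simp
  | succ m ih =>
    by_cases h0 : m = 0
    · subst h0
      have hr : (List.range 1).drop 1 = ([] : List Nat) := rfl
      rw [hr]
      apply List.ext_getElem
      · simp
      · intro k h1 h2
        simp only [List.foldl_nil, List.getElem_replicate, List.getElem_map, List.getElem_range]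
        by_cases hk : k < 1
        · have : k = 0 := by omega
          subst this
          simp [lastUnmarked_zero]
        · simp [hk]
    · have h1m : 1 ≤ m := by omega
      have hmr : (1 : Nat) ≤ (List.range m).length := by simpa using h1m
      rw [List.range_succ, List.drop_append_of_le_length hmr, List.foldl_append,
        ih (by omega)]
      simp only [List.foldl_cons, List.foldl_nil]
      rw [innerA_eq]
      by_cases hroot : lastUnmarked T m = -1
      · simp only [hroot, if_true]
        apply map_range_congr
        intro k hk
        rcases eq_or_ne k m with h | h
        · subst h; simp [hroot]
        · by_cases hlt : k < m
          · simp [hlt, show k < m + 1 by omega]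
          · simp [hlt, show ¬ k < m + 1 by omega]
      · simp only [hroot, if_false]
        rw [set_map_range]
        apply map_range_congr
        intro k hk
        rcases eq_or_ne k m with h | h
        · subst h; simp
        · by_cases hlt : k < m
          · simp [h, hlt, show k < m + 1 by omega]
          · simp [h, hlt, show ¬ k < m + 1 by omega]

-- the chain walk in phase 2 returns the root (the state is already compressed below m)
theorem chase_eq (T : List (List (Bool × Int))) (n m : Nat) (hm : m < n)
    (e : List Int)
    (he : e = (List.range n).map (fun k =>
      if k < m then (if lastUnmarked T k = -1 then -1 else (rootF T k : Int))
      else lastUnmarked T k)) :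
    chaseA e m (n + 1) = rootF T m := by
  have hget : ∀ k, k < n → e.getD k (-1)
      = (if k < m then (if lastUnmarked T k = -1 then -1 else (rootF T k : Int))
         else lastUnmarked T k) := by
    intro k hk; rw [he]; exact PySem.List.getD_map_range _ _ _ _ hk
  rw [chaseA_succ, hget m hm]
  simp only [lt_irrefl, if_false]
  by_cases h1 : lastUnmarked T m = -1
  · simp [h1, rootF_eq_of_root T m h1]
  · have hq := lastUnmarked_lt T m h1
    simp only [h1, if_false]
    have hm1 : 1 ≤ m := by omega
    obtain ⟨n', rfl⟩ : ∃ n', n = n' + 2 := ⟨n - 2, by omega⟩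
    rw [chaseA_succ, hget (lastUnmarked T m).toNat (by omega)]
    simp only [hq.1, if_true]
    by_cases h2 : lastUnmarked T (lastUnmarked T m).toNat = -1
    · simp [h2, rootF_eq_step T m h1, rootF_eq_of_root T _ h2]
    · have hne : ¬ ((rootF T (lastUnmarked T m).toNat : Int) = -1) := by omega
      simp only [h2, if_false, hne]
      have hrq : rootF T (lastUnmarked T m).toNat < (lastUnmarked T m).toNat := by
        have hle := rootF_le T (lastUnmarked T m).toNat
        have hns : rootF T (lastUnmarked T m).toNat ≠ (lastUnmarked T m).toNat := by
          intro hh; exact h2 ((rootF_eq_self_iff T _).mp hh)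
        omega
      rw [Int.toNat_natCast, chaseA_succ,
        hget (rootF T (lastUnmarked T m).toNat) (by omega)]
      have hrm : rootF T (lastUnmarked T m).toNat < m := by omega
      have hroot : lastUnmarked T (rootF T (lastUnmarked T m).toNat) = -1 :=
        rootF_root T _
      simp [hrm, hroot, rootF_eq_step T m h1]

theorem phase2A (T : List (List (Bool × Int))) (m : Nat) (hm : m ≤ T.length) :
    (List.range m).foldl bodyA ((List.range T.length).map (lastUnmarked T), 0)
      = ((List.range T.length).map (fun k =>
            if k < m then (if lastUnmarked T k = -1 then -1 else (rootF T k : Int))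
            else lastUnmarked T k),
         (((List.range m).filter (fun k => lastUnmarked T k = -1)).length : Int)) := by
  induction m with
  | zero => simp
  | succ m ih =>
    have hm' : m < T.length := by omega
    rw [List.range_succ, List.foldl_append, ih (by omega)]
    simp only [List.foldl_cons, List.foldl_nil]
    rw [bodyA]
    have hgm : ((List.range T.length).map (fun k =>
        if k < m then (if lastUnmarked T k = -1 then -1 else (rootF T k : Int))
        else lastUnmarked T k)).getD m (-1) = lastUnmarked T m := by
      rw [PySem.List.getD_map_range _ _ _ _ hm']; simp
    have hlen : ((List.range T.length).map (fun k =>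
        if k < m then (if lastUnmarked T k = -1 then -1 else (rootF T k : Int))
        else lastUnmarked T k)).length = T.length := by simp
    have hch : chaseA ((List.range T.length).map (fun k =>
        if k < m then (if lastUnmarked T k = -1 then -1 else (rootF T k : Int))
        else lastUnmarked T k)) m (((List.range T.length).map (fun k =>
        if k < m then (if lastUnmarked T k = -1 then -1 else (rootF T k : Int))
        else lastUnmarked T k)).length + 1) = rootF T m := by
      rw [hlen]; exact chase_eq T T.length m hm' _ rfl
    dsimp only
    rw [hgm, hch]
    by_cases h1 : lastUnmarked T m = -1
    · have hr : rootF T m = m := rootF_eq_of_root T m h1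
      rw [hr]
      simp only [ne_eq, not_true_eq_false, if_false, h1, if_true]
      refine Prod.ext ?_ (by simp [h1])
      apply map_range_congr
      intro k hk
      rcases eq_or_ne k m with h | h
      · subst h; simp [h1]
      · by_cases hlt : k < m
        · simp [hlt, show k < m + 1 by omega]
        · simp [hlt, show ¬ k < m + 1 by omega]
    · have hr : rootF T m ≠ m := fun hh => h1 ((rootF_eq_self_iff T m).mp hh)
      simp only [ne_eq, (Ne.symm hr), not_false_eq_true, if_true, h1, if_false]
      refine Prod.ext ?_ (by simp [h1])
      rw [set_map_range]
      apply map_range_congr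
      intro k hk
      rcases eq_or_ne k m with h | h
      · subst h; simp [h1]
      · by_cases hlt : k < m
        · simp [h, hlt, show k < m + 1 by omega]
        · simp [h, hlt, show ¬ k < m + 1 by omega]

theorem phase2B (T : List (List (Bool × Int))) (m : Nat) (hm : m ≤ T.length) :
    (List.range m).foldl (bodyB ((List.range T.length).map (lastUnmarked T)))
        (List.replicate T.length 0, List.replicate T.length (-1), 0)
      = ((List.range T.length).map (fun k => if k < m then (rootF T k : Int) else 0),
         (List.range T.length).map (fun k =>
            if k < m then (if lastUnmarked T k = -1 then -1 else (rootF T k : Int)) else -1),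
         (((List.range m).filter (fun k => lastUnmarked T k = -1)).length : Int)) := by
  induction m with
  | zero =>
    simp only [List.range_zero, List.foldl_nil]
    refine Prod.ext ?_ (Prod.ext ?_ (by simp)) <;> dsimp only <;>
        apply List.ext_getElem <;> simp
  | succ m ih =>
    have hm' : m < T.length := by omega
    rw [List.range_succ, List.foldl_append, ih (by omega)]
    simp only [List.foldl_cons, List.foldl_nil]
    rw [bodyB]
    have hgp : ((List.range T.length).map (lastUnmarked T)).getD m (-1)
        = lastUnmarked T m := PySem.List.getD_map_range _ _ _ _ hm'
    dsimp only
    rw [hgp]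
    by_cases h1 : lastUnmarked T m = -1
    · have hr : rootF T m = m := rootF_eq_of_root T m h1
      simp only [h1, if_true]
      refine Prod.ext ?_ (Prod.ext ?_ (by simp [h1]))
      · dsimp only
        rw [set_map_range]
        apply map_range_congr
        intro k hk
        rcases eq_or_ne k m with h | h
        · subst h; simp [show k < k + 1 by omega, hr]
        · by_cases hlt : k < m
          · simp [h, hlt, show k < m + 1 by omega]
          · simp [h, hlt, show ¬ k < m + 1 by omega]
      · dsimp only
        apply map_range_congr
        intro k hk
        rcases eq_or_ne k m with h | h
        · subst h; simp [h1]
        · by_cases hlt : k < m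
          · simp [hlt, show k < m + 1 by omega]
          · simp [hlt, show ¬ k < m + 1 by omega]
    · have hq := lastUnmarked_lt T m h1
      have hgr : ((List.range T.length).map (fun k =>
          if k < m then (rootF T k : Int) else 0)).getD (lastUnmarked T m).toNat 0
          = (rootF T (lastUnmarked T m).toNat : Int) := by
        rw [PySem.List.getD_map_range _ _ _ _ (by omega : (lastUnmarked T m).toNat < T.length)]
        simp [hq.1]
      have hstep : rootF T m = rootF T (lastUnmarked T m).toNat := rootF_eq_step T m h1
      simp only [h1, if_false]
      rw [hgr]
      refine Prod.ext ?_ (Prod.ext ?_ (by simp [h1]))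
      · dsimp only
        rw [set_map_range]
        apply map_range_congr
        intro k hk
        rcases eq_or_ne k m with h | h
        · subst h; simp [show k < k + 1 by omega, hstep]
        · by_cases hlt : k < m
          · simp [h, hlt, show k < m + 1 by omega]
          · simp [h, hlt, show ¬ k < m + 1 by omega]
      · dsimp only
        rw [set_map_range]
        apply map_range_congr
        intro k hk
        rcases eq_or_ne k m with h | h
        · subst h; simp [show k < k + 1 by omega, h1, hstep]
        · by_cases hlt : k < m
          · simp [h, hlt, show k < m + 1 by omega]
          · simp [h, hlt, show ¬ k < m + 1 by omega]

-- ===== VERDICT (by name: the statement is the Claim_ definition above) =====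
theorem equivStates_spec : Claim_equal_equivStates := by
  intro T _ _
  unfold Spec_equivStates
  show equivStates T = equivStates_alt T
  have h1 : ((List.range T.length).drop 1).foldl (fun e j => innerA T j e)
      (List.replicate T.length (-1)) = (List.range T.length).map (lastUnmarked T) := by
    rw [phase1_upto T T.length le_rfl]
    apply map_range_congr
    intro k hk
    simp [hk]
  have hA : equivStates T
      = ((List.range T.length).map (fun k =>
            if k < T.length then (if lastUnmarked T k = -1 then -1 else (rootF T k : Int))
            else lastUnmarked T k),
         (((List.range T.length).filter (fun k => lastUnmarked T k = -1)).length : Int)) := by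
    unfold equivStates
    dsimp only
    rw [h1, show ((List.range T.length).map (lastUnmarked T)).length = T.length by simp]
    exact phase2A T T.length le_rfl
  have hB : equivStates_alt T
      = ((List.range T.length).map (fun k =>
            if k < T.length then (if lastUnmarked T k = -1 then -1 else (rootF T k : Int))
            else -1),
         (((List.range T.length).filter (fun k => lastUnmarked T k = -1)).length : Int)) := by
    unfold equivStates_alt
    dsimp only
    rw [phase2B T T.length le_rfl]
  rw [hA, hB]
  refine Prod.ext ?_ (by simp)
  apply map_range_congr
  intro k hk
  simp [hk]
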